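-- pv_equiv track=rewrite | github.com/Semne77/Portfolio | SOS_Game/SOS_Game.py | check_sos1
-- ===== SOURCE A (Python) =====
-- def check_sos1(coordinates):
--     if not coordinates:  # Check if coordinates list is empty
--         return False
--
--     directions = [
--         (0, 1),  # Right
--         (0, -1),  # Left
--         (1, 0),  # Down
--         (-1, 0),  # Up
--         (1, 1),  # Down-Right
--         (-1, -1),  # Up-Left
--         (1, -1),  # Down-Left
--         (-1, 1)  # Up-Right
--     ]
--
--     # Convert list of coordinates to a more efficient search structure
--     coord_map = {(x, y): symbol for x, y, symbol in coordinates}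
--
--     x, y, symbol = coordinates[-1]  # Get the last element from coordinates
--     if symbol == 'S':
--         for dx, dy in directions:
--             first = (x + dx, y + dy)
--             second = (x + 2*dx, y + 2*dy)
--
--             if first in coord_map and second in coord_map:
--                 if coord_map[first] == 'O' and coord_map[second] == 'S':
--                     return True  # SOS formation found
--     elif symbol == 'O':
--         for dx, dy in directions:
--             sos_pattern1 = (x - dx, y - dy)  # Check the left side of 'O'
--             sos_pattern2 = (x + dx, y + dy)  # Check the right side of 'O'
--
--             if sos_pattern1 in coord_map and sos_pattern2 in coord_map:
--                 if coord_map[sos_pattern1] == 'S' and coord_map[sos_pattern2] == 'S':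
--                     return True  # SOS formation found
--     return False  # No SOS formation found
-- ===== SOURCE B (Python) =====
-- def check_sos1(coordinates):
--     if not coordinates:
--         return False
--     board = {(x, y): s for x, y, s in coordinates}
--     x, y, _ = coordinates[-1]
--     for dx, dy in ((0, 1), (1, 0), (1, 1), (1, -1)):
--         for k in (-2, -1, 0):
--             if all(board.get((x + (k + i) * dx, y + (k + i) * dy)) == w
--                    for i, w in ((0, 'S'), (1, 'O'), (2, 'S'))):
--                 return True
--     return False
-- ===== Notes on version B (the rewrite author's own statement) =====
-- stated objective: simpler
-- what changed: Replaces A's two symbol-specific branches (8 directions each, with separate membership and value checks) by one uniform scan of the 12 three-cell windows through the last tile (4 axes x 3 offsets), each matched directly against the pattern S,O,S via dict.get.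
import Mathlib
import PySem

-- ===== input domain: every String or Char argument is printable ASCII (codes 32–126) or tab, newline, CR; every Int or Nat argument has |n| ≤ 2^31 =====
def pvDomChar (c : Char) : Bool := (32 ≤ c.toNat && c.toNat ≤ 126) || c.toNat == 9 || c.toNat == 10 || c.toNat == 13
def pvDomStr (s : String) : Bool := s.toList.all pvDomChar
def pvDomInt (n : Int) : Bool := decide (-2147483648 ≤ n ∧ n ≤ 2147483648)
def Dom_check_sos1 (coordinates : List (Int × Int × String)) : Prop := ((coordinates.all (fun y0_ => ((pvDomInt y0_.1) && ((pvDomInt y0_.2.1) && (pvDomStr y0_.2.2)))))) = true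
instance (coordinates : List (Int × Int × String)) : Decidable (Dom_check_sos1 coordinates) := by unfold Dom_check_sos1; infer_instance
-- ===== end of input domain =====

-- B replaces A's two symbol-specific 8-direction branches by one uniform scan of the
-- 12 three-cell windows through the last tile (simpler decomposition; same O(n) cost).

-- ===== PORT A =====
def check_sos1 (coordinates : List (Int × Int × String)) : Bool :=
  if coordinates.isEmpty then false
  else
    let directions : List (Int × Int) :=
      [(0,1), (0,-1), (1,0), (-1,0), (1,1), (-1,-1), (1,-1), (-1,1)]
    let coord_map : PySem.Dict (Int × Int) String :=
      coordinates.foldl (fun d t => d.insert (t.1, t.2.1) t.2.2) PySem.Dict.empty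
    match coordinates.getLast? with   -- coordinates[-1]; the list is nonempty here
    | none => false
    | some (x, y, symbol) =>
      if symbol == "S" then
        directions.any (fun dir =>
          let first := (x + dir.1, y + dir.2)
          let second := (x + 2*dir.1, y + 2*dir.2)
          if coord_map.contains first && coord_map.contains second then
            coord_map.getD first "" == "O" && coord_map.getD second "" == "S"
          else false)
      else if symbol == "O" then
        directions.any (fun dir =>
          let p1 := (x - dir.1, y - dir.2)
          let p2 := (x + dir.1, y + dir.2)
          if coord_map.contains p1 && coord_map.contains p2 then
            coord_map.getD p1 "" == "S" && coord_map.getD p2 "" == "S"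
          else false)
      else false

-- ===== PORT B =====
def check_sos1_alt (coordinates : List (Int × Int × String)) : Bool :=
  if coordinates.isEmpty then false
  else
    let board : PySem.Dict (Int × Int) String :=
      coordinates.foldl (fun d t => d.insert (t.1, t.2.1) t.2.2) PySem.Dict.empty
    match coordinates.getLast? with   -- coordinates[-1]; the list is nonempty here
    | none => false
    | some (x, y, _) =>
      ([(0,1), (1,0), (1,1), (1,-1)] : List (Int × Int)).any (fun a =>
        ([-2, -1, 0] : List Int).any (fun k =>
          ([(0,"S"), (1,"O"), (2,"S")] : List (Int × String)).all (fun iw =>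
            board.get? (x + (k + iw.1) * a.1, y + (k + iw.1) * a.2) == some iw.2)))

-- ===== PRECONDITION & SPEC =====
def Spec_check_sos1 (coordinates : List (Int × Int × String)) (out : Bool) : Prop := out = check_sos1_alt coordinates
instance (coordinates : List (Int × Int × String)) (out : Bool) : Decidable (Spec_check_sos1 coordinates out) := by unfold Spec_check_sos1; infer_instance

-- ===== CLAIM (what is proved, stated in full; the proofs are below) =====
def Claim_equal_check_sos1 : Prop := ∀ (coordinates : List (Int × Int × String)), Dom_check_sos1 coordinates → Spec_check_sos1 coordinates (check_sos1 coordinates)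

-- ===== LEMMAS AND PROOFS =====

-- A's "membership then value" test collapses to a get? comparison.
lemma pair_check (d : PySem.Dict (Int × Int) String) (p q : Int × Int) (v w : String) :
    (if d.contains p && d.contains q then
       d.getD p "" == v && d.getD q "" == w
     else false)
    = ((d.get? p == some v) && (d.get? q == some w)) := by
  rw [PySem.Dict.contains_eq_isSome_get? d p, PySem.Dict.contains_eq_isSome_get? d q,
      PySem.Dict.getD_eq_get?_getD, PySem.Dict.getD_eq_get?_getD]
  cases d.get? p <;> cases d.get? q <;> simp

-- ===== VERDICT (by name: the statement is the Claim_ definition above) =====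
set_option maxHeartbeats 1600000 in
theorem check_sos1_spec : Claim_equal_check_sos1 := by
  intro coordinates _
  unfold Spec_check_sos1 check_sos1 check_sos1_alt
  rcases List.eq_nil_or_concat coordinates with rfl | ⟨init, e, rfl⟩
  · simp
  · obtain ⟨x, y, s⟩ := e
    have hne : (init ++ [((x:Int), (y:Int), (s:String))]).isEmpty = false := by simp
    simp only [List.concat_eq_append, hne, List.getLast?_concat,
      List.foldl_append, List.foldl_cons, List.foldl_nil]
    set D := (init.foldl (fun d t => d.insert (t.1, t.2.1) t.2.2) PySem.Dict.empty).insert (x, y) s with hD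
    have hc : D.get? (x, y) = some s := PySem.Dict.get?_insert_self _ _ _
    simp only [List.any_cons, List.any_nil, List.all_cons, List.all_nil, pair_check]
    ring_nf
    simp only [hc]
    by_cases hS : s = "S"
    · subst hS
      simp only [BEq.rfl, if_true, beq_iff_eq, String.reduceEq, Bool.and_true, Bool.true_and]
      have e1 : ((some "S" : Option String) == some "O") = false := rfl
      simp only [e1, Bool.false_and, Bool.and_false, Bool.or_false, Bool.false_or]
      generalize (D.get? (x, 1 + y) == some "O") = g1
      generalize (D.get? (x, 2 + y) == some "S") = g2
      generalize (D.get? (x, -1 + y) == some "O") = g3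
      generalize (D.get? (x, -2 + y) == some "S") = g4
      generalize (D.get? (1 + x, y) == some "O") = g5
      generalize (D.get? (2 + x, y) == some "S") = g6
      generalize (D.get? (-1 + x, y) == some "O") = g7
      generalize (D.get? (-2 + x, y) == some "S") = g8
      generalize (D.get? (1 + x, 1 + y) == some "O") = g9
      generalize (D.get? (2 + x, 2 + y) == some "S") = g10
      generalize (D.get? (-1 + x, -1 + y) == some "O") = g11
      generalize (D.get? (-2 + x, -2 + y) == some "S") = g12
      generalize (D.get? (1 + x, -1 + y) == some "O") = g13
      generalize (D.get? (2 + x, -2 + y) == some "S") = g14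
      generalize (D.get? (-1 + x, 1 + y) == some "O") = g15
      generalize (D.get? (-2 + x, 2 + y) == some "S") = g16
      revert g1 g2 g3 g4 g5 g6 g7 g8 g9 g10 g11 g12 g13 g14 g15 g16
      decide
    · by_cases hO : s = "O"
      · subst hO
        simp only [beq_iff_eq, String.reduceEq, if_false, if_true]
        have e2 : ((some "O" : Option String) == some "S") = false := rfl
        have e3 : ((some "O" : Option String) == some "O") = true := rfl
        simp only [e2, e3, Bool.false_and, Bool.and_false, Bool.true_and, Bool.or_false,
          Bool.false_or]
        generalize (D.get? (x, -1 + y) == some "S") = h1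
        generalize (D.get? (x, 1 + y) == some "S") = h2
        generalize (D.get? (-1 + x, y) == some "S") = h3
        generalize (D.get? (1 + x, y) == some "S") = h4
        generalize (D.get? (-1 + x, -1 + y) == some "S") = h5
        generalize (D.get? (1 + x, 1 + y) == some "S") = h6
        generalize (D.get? (-1 + x, 1 + y) == some "S") = h7
        generalize (D.get? (1 + x, -1 + y) == some "S") = h8
        revert h1 h2 h3 h4 h5 h6 h7 h8
        decide
      · simp [hS, hO]
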